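-- pv_equiv track=rewrite | github.com/Fondamenti18/fondamenti-di-programmazione | students/1602302/homework01/program03.py | chiave1
-- ===== SOURCE A (Python) =====
-- def chiave1(key):
--     key.replace(" ","")
--     key=list(key)
--     cont1=0
--     #tolgo maiuscole
--     for x in key:
--         if x<'a' or x>'z' :
--             key[cont1]=""
--         cont1+=1
--     #tolgo elementi lista nulli
--     while key.count("")>0:
--         key.remove("")
--     #tolgo le lettere che si ripetono tranne l' ultima
--     for b in key:
--         if key.count(b)>1:
--             conk=key.count(b)-1
--             while conk>0:
--                 key.insert(key.index(b),"")
--                 key.remove(b)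
--                 conk-=1
--
--     key="".join(key)
--     return key
-- ===== SOURCE B (Python) =====
-- def chiave1(key):
--     seen = set()
--     out = []
--     for c in reversed(key):
--         if 'a' <= c <= 'z' and c not in seen:
--             out.append(c)
--             seen.add(c)
--     return ''.join(reversed(out))
-- ===== Notes on version B (the rewrite author's own statement) =====
-- stated objective: faster
-- what changed: A repeatedly rescans the list with count/index/insert/remove to blank earlier duplicates (quadratic); B does a single reverse pass with a seen-set, keeping each lowercase letter at its last occurrence.
import Mathlib
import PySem

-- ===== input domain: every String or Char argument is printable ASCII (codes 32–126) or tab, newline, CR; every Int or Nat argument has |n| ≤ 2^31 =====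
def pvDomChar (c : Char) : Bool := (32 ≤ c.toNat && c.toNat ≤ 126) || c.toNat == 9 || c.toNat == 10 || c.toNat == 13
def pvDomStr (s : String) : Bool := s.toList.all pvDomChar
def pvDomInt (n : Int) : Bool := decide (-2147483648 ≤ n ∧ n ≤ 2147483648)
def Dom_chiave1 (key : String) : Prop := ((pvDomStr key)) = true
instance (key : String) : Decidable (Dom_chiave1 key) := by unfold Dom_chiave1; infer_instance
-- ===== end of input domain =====

-- B rewrites A's quadratic blank-and-rescan dedup as one reverse pass with a seen-set (objective: faster).
-- ===== PORT A =====
-- A works on the list of A's 1-char strings; "" and 1-char strings are represented as List Char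
-- (PySem's carrier for Python strings), so [] is Python's "" and [c] a 1-char string.

-- 'while key.count("") > 0: key.remove("")'
def pvStrip (l : List (List Char)) : List (List Char) :=
  if h : 0 < PySem.List.count l ([] : List Char) then
    match h2 : PySem.List.remove? l ([] : List Char) with
    | some l' => pvStrip l'
    | none => l
  else l
termination_by PySem.List.count l ([] : List Char)
decreasing_by
  have hm : ([] : List Char) ∈ l := by
    have h' := h; simp [PySem.List.count_eq] at h'; exact h'
  rw [PySem.List.remove?_eq_some_erase _ _ hm] at h2
  cases h2
  have h' := h
  simp [PySem.List.count_eq, List.count_erase_self] at *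
  omega

-- 'while conk > 0: key.insert(key.index(b), ""); key.remove(b); conk -= 1'
def pvInner (l : List (List Char)) (b : List Char) (conk : Nat) : List (List Char) :=
  match conk with
  | 0 => l
  | k+1 =>
    match PySem.List.index? l b with
    | none => l  -- unreachable here (Python would raise ValueError)
    | some idx =>
      match PySem.List.remove? (PySem.List.insert l (idx : Int) ([] : List Char)) b with
      | none => PySem.List.insert l (idx : Int) ([] : List Char)  -- unreachable (ValueError)
      | some l2 => pvInner l2 b k

-- the loop body never changes the list length (needed for pvLoop's termination)
lemma pvRemove_insert (l : List (List Char)) (b : List Char) (idx : Nat)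
    (hix : PySem.List.index? l b = some idx) :
    PySem.List.remove? (PySem.List.insert l (idx : Int) ([] : List Char)) b
      = some (l.set idx ([] : List Char)) := by
  obtain ⟨pre, suf, rfl, rfl, hnb⟩ := (PySem.List.index?_eq_some_iff _ _ _).1 hix
  have hle : pre.length ≤ (pre ++ b :: suf).length := by simp
  rw [PySem.List.insert_natCast _ _ _ hle]
  have hmem : b ∈ (pre ++ b :: suf).take pre.length ++ ([] : List Char) :: (pre ++ b :: suf).drop pre.length := by
    simp
  rw [PySem.List.remove?_eq_some_erase _ _ hmem]
  congr 1
  rw [List.take_left, List.drop_left]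
  by_cases hb : b = ([] : List Char)
  · subst hb
    rw [List.erase_append_right _ (by simpa using hnb), List.erase_cons_head]
    simp [List.set_cons_zero]
  · rw [List.erase_append_right _ (by simpa using hnb),
        List.erase_cons_tail (by simpa using (Ne.symm hb)), List.erase_cons_head]
    simp [List.set_cons_zero]

lemma pvInner_succ (l : List (List Char)) (b : List Char) (k idx : Nat)
    (hix : PySem.List.index? l b = some idx) :
    pvInner l b (k+1) = pvInner (l.set idx ([] : List Char)) b k := by
  simp only [pvInner, hix, pvRemove_insert l b idx hix]

lemma pvInner_length (b : List Char) (k : Nat) : ∀ l, (pvInner l b k).length = l.length := by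
  induction k with
  | zero => intro l; rfl
  | succ k ih =>
    intro l
    cases hix : PySem.List.index? l b with
    | none => rw [pvInner, hix]
    | some idx => rw [pvInner_succ l b k idx hix, ih, List.length_set]

-- 'for b in key: if key.count(b) > 1: …' — Python's for over the mutating list walks indices
def pvLoop (l : List (List Char)) (i : Nat) : List (List Char) :=
  if h : i < l.length then
    pvLoop (if 1 < PySem.List.count l l[i] then pvInner l l[i] (PySem.List.count l l[i] - 1) else l) (i+1)
  else l
termination_by l.length - i
decreasing_by
  split
  · rw [pvInner_length]; omega
  · omega

def chiave1 (key : String) : String :=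
  -- 'key.replace(" ","")' has its result discarded by A, so it is a no-op
  let key1 : List (List Char) := key.toList.map (fun c => [c])           -- key = list(key)
  let key2 := key1.map (fun x =>                                          -- for x in key: if x<'a' or x>'z': key[cont1] = ""
    if PySem.Chars.strLt x ['a'] || PySem.Chars.strLt ['z'] x then [] else x)
  let key3 := pvStrip key2
  let key4 := pvLoop key3 0
  String.ofList (PySem.Chars.join [] key4)                                    -- key = "".join(key)

-- ===== PORT B =====
def chiave1_alt (key : String) : String :=
  let r := key.toList.reverse.foldl                                       -- for c in reversed(key):
    (fun (acc : List Char × PySem.Set Char) c =>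
      if ('a' ≤ c ∧ c ≤ 'z') ∧ ¬(PySem.Set.contains acc.2 c = true)       -- if 'a' <= c <= 'z' and c not in seen:
      then (acc.1 ++ [c], PySem.Set.add acc.2 c)                          --   out.append(c); seen.add(c)
      else acc)
    ([], PySem.Set.empty)
  String.ofList r.1.reverse                                                   -- ''.join(reversed(out))

-- ===== PRECONDITION & SPEC =====
def Spec_chiave1 (key : String) (out : String) : Prop := out = chiave1_alt key
instance (key : String) (out : String) : Decidable (Spec_chiave1 key out) := by unfold Spec_chiave1; infer_instance

-- ===== CLAIM (what is proved, stated in full; the proofs are below) =====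
def Claim_equal_chiave1 : Prop := ∀ (key : String), Dom_chiave1 key → Spec_chiave1 key (chiave1 key)

-- ===== LEMMAS AND PROOFS =====

-- Bool test "c is a lowercase letter"
def pvLCb (c : Char) : Bool := decide ('a' ≤ c ∧ c ≤ 'z')

-- Bool test "non-empty" kept opaque so simp does not normalise it away
def pvNE (x : List Char) : Bool := !(x == ([] : List Char))

lemma pvNE_nil : pvNE [] = false := rfl
lemma pvNE_cons (c : Char) (x : List Char) : pvNE (c :: x) = true := rfl

-- the common shape: keep each lowercase letter at its last occurrence
def pvKeepLast : List Char → List Char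
  | [] => []
  | c :: t => if c ∈ t then pvKeepLast t else c :: pvKeepLast t

-- state of A's list after the dedup loop has processed all first occurrences lying inside `fI`
def pvGo (fI : List Char) : List Char → List (List Char)
  | [] => []
  | c :: t => (if c ∈ t ∧ c ∈ fI then [] else [c]) :: pvGo fI t

-- blank the first k occurrences of v
def pvBlankFirst (l : List (List Char)) (v : List Char) (k : Nat) : List (List Char) :=
  match k, l with
  | 0, l => l
  | _+1, [] => []
  | k+1, x :: t => if x = v then [] :: pvBlankFirst t v k else x :: pvBlankFirst t v (k+1)

-- what B's spec computes before the lc-filter is pushed in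
def pvBSpec (s : List Char) : List Char → List Char
  | [] => []
  | c :: t => if ('a' ≤ c ∧ c ≤ 'z') ∧ c ∉ t ∧ c ∉ s then c :: pvBSpec s t else pvBSpec s t

lemma pvStrLt_singleton (x y : Char) : PySem.Chars.strLt [x] [y] = decide (x < y) := by
  have : (([x] : List Char) < [y]) ↔ x < y := by
    constructor
    · intro h; cases h with
      | rel h => exact h
      | cons h => cases h
    · intro h; exact List.Lex.rel h
  simp [PySem.Chars.strLt, this]

lemma pvCond (c : Char) :
    (PySem.Chars.strLt [c] ['a'] || PySem.Chars.strLt ['z'] [c]) = !pvLCb c := by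
  rw [pvStrLt_singleton, pvStrLt_singleton, pvLCb]
  by_cases h1 : c < 'a'
  · simp [h1, not_le.2 h1]
  · by_cases h2 : 'z' < c
    · simp [h2, not_le.2 h2]
    · simp [h1, h2, not_lt.1 h1, not_lt.1 h2]

lemma pvFilter_erase (l : List (List Char)) :
    (l.erase ([] : List Char)).filter pvNE
      = l.filter pvNE := by
  induction l with
  | nil => rfl
  | cons x t ih =>
    by_cases hx : x = ([] : List Char)
    · subst hx; rw [List.erase_cons_head]
      rw [List.filter_cons, pvNE_nil]
      simp
    · rw [List.erase_cons_tail (by simpa using (fun h => hx (by simpa using h)))]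
      rw [List.filter_cons, List.filter_cons, ih]

lemma pvStrip_eq (l : List (List Char)) :
    pvStrip l = l.filter pvNE := by
  induction l using pvStrip.induct with
  | case1 l h l' h2 ih =>
    have hm : ([] : List Char) ∈ l := by
      have h' := h; simp [PySem.List.count_eq] at h'; exact h'
    have h2' := h2
    rw [PySem.List.remove?_eq_some_erase _ _ hm] at h2'
    injection h2' with h2e
    rw [pvStrip, dif_pos h]
    split
    · rename_i l2 heq
      rw [h2] at heq
      injection heq with heq2
      subst heq2
      rw [ih, ← h2e]
      exact pvFilter_erase l
    · rename_i heq
      rw [h2] at heq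
      cases heq
  | case2 l h h2 =>
    have hm : ([] : List Char) ∈ l := by
      have h' := h; simp [PySem.List.count_eq] at h'; exact h'
    exact absurd ((PySem.List.remove?_eq_none_iff _ _).1 h2) (by simp [hm])
  | case3 l h =>
    rw [pvStrip, dif_neg h]
    have hm : ([] : List Char) ∉ l := by
      intro hmem
      exact h (by simp [PySem.List.count_eq, List.count_pos_iff, hmem])
    rw [eq_comm, List.filter_eq_self]
    intro a ha
    cases a with
    | nil => exact absurd ha hm
    | cons c x => exact pvNE_cons c x

lemma pvFilterMap (cs : List Char) :
    ((cs.map (fun c => if PySem.Chars.strLt [c] ['a'] || PySem.Chars.strLt ['z'] [c]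
        then ([] : List Char) else [c])).filter pvNE)
      = (cs.filter pvLCb).map (fun c => [c]) := by
  have hfun : (fun c => if PySem.Chars.strLt [c] ['a'] || PySem.Chars.strLt ['z'] [c]
      then ([] : List Char) else [c]) = (fun c => if pvLCb c then [c] else []) := by
    funext c
    rw [pvCond]
    cases pvLCb c <;> simp
  rw [hfun]
  induction cs with
  | nil => rfl
  | cons c t ih =>
    simp only [List.map_cons, List.filter_cons]
    cases h : pvLCb c with
    | true => simp [h, pvNE_cons, ih]
    | false => simp [h, pvNE_nil, ih]

lemma pvGo_length (fI ds : List Char) : (pvGo fI ds).length = ds.length := by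
  induction ds with
  | nil => rfl
  | cons c t ih => simp [pvGo, ih]

lemma pvGo_nilF (ds : List Char) : pvGo [] ds = ds.map (fun c => [c]) := by
  induction ds with
  | nil => rfl
  | cons c t ih => simp [pvGo, ih]

lemma pvGo_getElem (fI : List Char) (ds : List Char) (j : Nat) (h : j < ds.length) :
    (pvGo fI ds)[j]'(by rw [pvGo_length]; exact h)
      = if ds[j] ∈ ds.drop (j+1) ∧ ds[j] ∈ fI then [] else [ds[j]] := by
  induction ds generalizing j with
  | nil => simp at h
  | cons c t ih =>
    cases j with
    | zero => simp [pvGo]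
    | succ j => simpa [pvGo] using ih j (by simpa using h)

lemma pvGo_congr (fI fI' ds : List Char) (h : ∀ x ∈ ds, (x ∈ fI ↔ x ∈ fI')) :
    pvGo fI ds = pvGo fI' ds := by
  induction ds with
  | nil => rfl
  | cons c t ih =>
    simp only [pvGo]
    rw [ih (fun x hx => h x (List.mem_cons_of_mem c hx))]
    congr 1
    by_cases hc : c ∈ t
    · simp [hc, h c List.mem_cons_self]
    · simp [hc]

lemma pvCount_go_not_mem (fI ds : List Char) (c : Char) (hc : c ∉ fI) :
    PySem.List.count (pvGo fI ds) [c] = List.count c ds := by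
  induction ds with
  | nil => rfl
  | cons d t ih =>
    rw [pvGo]
    by_cases hd : d = c
    · subst hd
      rw [if_neg (fun hh => hc hh.2)]
      simp only [PySem.List.count_eq, List.count_cons] at *
      simp [ih]
    · have helem : (if d ∈ t ∧ d ∈ fI then ([] : List Char) else [d]) ≠ [c] := by
        split
        · simp
        · simpa using hd
      simp only [PySem.List.count_eq, List.count_cons] at *
      simp [ih, helem]
      exact hd

lemma pvCount_go_mem (fI ds : List Char) (c : Char) (hc : c ∈ fI) :
    PySem.List.count (pvGo fI ds) [c] = if c ∈ ds then 1 else 0 := by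
  induction ds with
  | nil => rfl
  | cons d t ih =>
    rw [pvGo]
    by_cases hd : d = c
    · subst hd
      by_cases ht : d ∈ t
      · rw [if_pos ⟨ht, hc⟩]
        simp only [PySem.List.count_eq, List.count_cons] at *
        simp [ih, ht]
      · rw [if_neg (fun hh => ht hh.1)]
        simp only [PySem.List.count_eq, List.count_cons] at *
        simp [ih, ht]
    · have helem : (if d ∈ t ∧ d ∈ fI then ([] : List Char) else [d]) ≠ [c] := by
        split
        · simp
        · simpa using hd
      have hmem : (c ∈ d :: t) ↔ c ∈ t := by
        simp only [List.mem_cons]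
        exact or_iff_right (fun hh => hd hh.symm)
      simp only [PySem.List.count_eq, List.count_cons] at *
      simp [ih, helem, hmem]

lemma pvInner_nil (k : Nat) : ∀ l, ([] : List Char) ∈ l → pvInner l [] k = l := by
  induction k with
  | zero => intro l _; rfl
  | succ k ih =>
    intro l hm
    obtain ⟨idx, hix⟩ := Option.isSome_iff_exists.1 ((PySem.List.index?_isSome_iff _ _).2 hm)
    rw [pvInner_succ l [] k idx hix]
    obtain ⟨hk, hv, _⟩ := PySem.List.getElem_of_index?_eq_some hix
    have hset : l.set idx ([] : List Char) = l := by
      rw [← hv]; exact List.set_getElem_self hk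
    rw [hset]
    exact ih l hm

lemma pvBlankFirst_zero (l : List (List Char)) (v : List Char) : pvBlankFirst l v 0 = l := by
  cases l <;> rfl

lemma pvBlankFirst_cons_ne (x : List Char) (t : List (List Char)) (v : List Char) (k : Nat)
    (h : x ≠ v) : pvBlankFirst (x :: t) v k = x :: pvBlankFirst t v k := by
  cases k with
  | zero => rw [pvBlankFirst_zero, pvBlankFirst_zero]
  | succ k => simp [pvBlankFirst, h]

lemma pvBlankFirst_append (pre rest : List (List Char)) (v : List Char) (k : Nat)
    (h : v ∉ pre) : pvBlankFirst (pre ++ rest) v k = pre ++ pvBlankFirst rest v k := by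
  induction pre with
  | nil => rfl
  | cons x p ih =>
    have hx : x ≠ v := fun hh => h (hh ▸ List.mem_cons_self)
    rw [List.cons_append, pvBlankFirst_cons_ne _ _ _ _ hx, ih (fun hh => h (List.mem_cons_of_mem x hh))]
    rfl

lemma pvSet_append (pre suf : List (List Char)) (b x : List Char) :
    (pre ++ b :: suf).set pre.length x = pre ++ x :: suf := by
  rw [List.set_append_right _ _ (Nat.le_refl _)]
  simp

lemma pvInner_eq_blankFirst (v : List Char) (hv : v ≠ []) :
    ∀ (k : Nat) (l : List (List Char)), k ≤ PySem.List.count l v →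
      pvInner l v k = pvBlankFirst l v k := by
  intro k
  induction k with
  | zero => intro l _; rw [pvBlankFirst_zero]; rfl
  | succ k ih =>
    intro l hk
    have hm : v ∈ l := by
      have : 0 < PySem.List.count l v := by omega
      simpa [PySem.List.count_eq, List.count_pos_iff] using this
    obtain ⟨idx, hix⟩ := Option.isSome_iff_exists.1 ((PySem.List.index?_isSome_iff _ _).2 hm)
    obtain ⟨pre, suf, hdec, hlen, hnp⟩ := (PySem.List.index?_eq_some_iff _ _ _).1 hix
    subst hdec; subst hlen
    rw [pvInner_succ _ v k _ hix, pvSet_append]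
    have hcount : PySem.List.count (pre ++ ([] : List Char) :: suf) v = PySem.List.count (pre ++ v :: suf) v - 1 := by
      simp [PySem.List.count_eq, List.count_append, List.count_cons, Ne.symm hv,
        List.count_eq_zero.2 hnp]
    rw [ih _ (by omega)]
    rw [pvBlankFirst_append _ _ _ _ hnp, pvBlankFirst_append _ _ _ _ hnp]
    have hne : ([] : List Char) ≠ v := Ne.symm hv
    rw [pvBlankFirst_cons_ne _ _ _ _ hne]
    simp [pvBlankFirst]

lemma pvGo_append_single (fI ds : List Char) (c : Char) (h : List.count c ds ≤ 1) :
    pvGo (fI ++ [c]) ds = pvGo fI ds := by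
  induction ds with
  | nil => rfl
  | cons d t ih =>
    simp only [List.count_cons] at h
    by_cases hd : d = c
    · subst hd
      have ht : d ∉ t := List.count_eq_zero.1 (by simp at h; omega)
      simp [pvGo, ht, ih (by omega)]
    · simp only [pvGo, ih (by split_ifs at h <;> omega)]
      congr 1
      by_cases hdt : d ∈ t
      · simp [hdt, List.mem_append, hd]
      · simp [hdt]

lemma pvBlankFirst_go (fI ds : List Char) (c : Char) (hfi : c ∉ fI) (hds : c ∈ ds) :
    pvBlankFirst (pvGo fI ds) [c] (List.count c ds - 1) = pvGo (fI ++ [c]) ds := by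
  induction ds with
  | nil => simp at hds
  | cons d t ih =>
    by_cases hd : d = c
    · subst hd
      have hcond : ¬(d ∈ t ∧ d ∈ fI) := fun hh => hfi hh.2
      by_cases ht : d ∈ t
      · have hc1 : List.count d (d :: t) - 1 = (List.count d t - 1) + 1 := by
          have := List.count_pos_iff.2 ht
          simp [List.count_cons]; omega
        rw [pvGo, if_neg hcond, hc1, pvBlankFirst, if_pos rfl, ih ht]
        simp [pvGo, ht]
      · have hc0 : List.count d (d :: t) - 1 = 0 := by
          simp [List.count_cons, List.count_eq_zero.2 ht]
        rw [pvGo, if_neg hcond, hc0, pvBlankFirst_zero]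
        simp [pvGo, ht, pvGo_append_single fI t d (by simp [List.count_eq_zero.2 ht])]
    · have hcnt : List.count c (d :: t) = List.count c t := by
        rw [List.count_cons]
        simp [hd]
      have hct : c ∈ t := by cases List.mem_cons.1 hds with
        | inl h => exact absurd h.symm hd
        | inr h => exact h
      have hel : (if d ∈ t ∧ d ∈ fI then ([] : List Char) else [d]) ≠ [c] := by
        split
        · simp
        · simpa using hd
      rw [pvGo, hcnt, pvBlankFirst_cons_ne _ _ _ _ hel, ih hct]
      -- (continued below)
      simp only [pvGo]
      congr 1
      by_cases hdt : d ∈ t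
      · simp [hdt, List.mem_append, hd]
      · simp [hdt]

lemma pvTake_succ_of_lt (ds : List Char) (i : Nat) (h : i < ds.length) :
    ds.take (i+1) = ds.take i ++ [ds[i]] := by
  rw [List.take_add_one, List.getElem?_eq_getElem h]
  rfl

lemma pvLoop_go (ds : List Char) : ∀ (n i : Nat), ds.length - i ≤ n →
    pvLoop (pvGo (ds.take i) ds) i = pvGo ds ds := by
  intro n
  induction n with
  | zero =>
    intro i hi
    rw [pvLoop, dif_neg (by rw [pvGo_length]; omega)]
    rw [List.take_of_length_le (by omega)]
  | succ n ih =>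
    intro i hi
    by_cases h : i < ds.length
    · rw [pvLoop, dif_pos (by rw [pvGo_length]; exact h)]
      have hb : (pvGo (ds.take i) ds)[i]'(by rw [pvGo_length]; exact h)
          = if ds[i] ∈ ds.drop (i+1) ∧ ds[i] ∈ ds.take i then [] else [ds[i]] :=
        pvGo_getElem _ ds i h
      set c := ds[i] with hc
      have hcds : c ∈ ds := List.getElem_mem h
      by_cases hcond : c ∈ ds.drop (i+1) ∧ c ∈ ds.take i
      · -- position already blanked: the body is the identity
        rw [hb, if_pos hcond]
        have hnext : pvGo (ds.take i) ds = pvGo (ds.take (i+1)) ds := by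
          apply pvGo_congr
          intro x hx
          rw [pvTake_succ_of_lt ds i h]
          constructor
          · intro hxx; exact List.mem_append_left _ hxx
          · intro hxx; cases List.mem_append.1 hxx with
            | inl hh => exact hh
            | inr hh => simpa using (List.mem_singleton.1 hh) ▸ hcond.2
        have hid : ∀ m, (if 1 < m then pvInner (pvGo (ds.take i) ds) [] (m - 1) else pvGo (ds.take i) ds) = pvGo (ds.take i) ds := by
          intro m
          split
          · apply pvInner_nil
            have hnil : (pvGo (ds.take i) ds)[i]'(by rw [pvGo_length]; exact h) = [] := by
              rw [hb]; exact if_pos hcond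
            exact hnil ▸ List.getElem_mem _
          · rfl
        rw [hid, hnext]
        exact ih (i+1) (by omega)
      · rw [hb, if_neg hcond]
        by_cases htake : c ∈ ds.take i
        · -- first occurrence already processed: this is the last occurrence, count is 1
          have hcnt : PySem.List.count (pvGo (ds.take i) ds) [c] = 1 := by
            rw [pvCount_go_mem _ _ _ htake, if_pos hcds]
          rw [hcnt, if_neg (by omega)]
          have hnext : pvGo (ds.take i) ds = pvGo (ds.take (i+1)) ds := by
            apply pvGo_congr
            intro x hx
            rw [pvTake_succ_of_lt ds i h]
            constructor
            · intro hxx; exact List.mem_append_left _ hxx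
            · intro hxx; cases List.mem_append.1 hxx with
              | inl hh => exact hh
              | inr hh => simpa using (List.mem_singleton.1 hh) ▸ htake
          rw [hnext]; exact ih (i+1) (by omega)
        · -- first occurrence of c: A blanks all but the last occurrence
          have hcnt : PySem.List.count (pvGo (ds.take i) ds) [c] = List.count c ds :=
            pvCount_go_not_mem _ _ _ htake
          rw [hcnt]
          have htk : ds.take (i+1) = ds.take i ++ [c] := pvTake_succ_of_lt ds i h
          by_cases hm : 1 < List.count c ds
          · rw [if_pos hm]
            rw [pvInner_eq_blankFirst [c] (by simp) _ _ (by rw [hcnt]; omega)]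
            rw [pvBlankFirst_go _ _ _ htake hcds, ← htk]
            exact ih (i+1) (by omega)
          · rw [if_neg hm]
            have : pvGo (ds.take i) ds = pvGo (ds.take (i+1)) ds := by
              rw [htk, pvGo_append_single _ _ _ (by omega)]
            rw [this]; exact ih (i+1) (by omega)
    · rw [pvLoop, dif_neg (by rw [pvGo_length]; omega)]
      rw [List.take_of_length_le (by omega)]

lemma pvJoin_flatten : ∀ parts : List (List Char), PySem.Chars.join [] parts = parts.flatten := by
  intro parts
  induction parts with
  | nil => exact PySem.Chars.join_nil []
  | cons p rest ih =>
    cases rest with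
    | nil => simp [PySem.Chars.join_singleton]
    | cons q r =>
      rw [PySem.Chars.join_cons_cons, ih]
      simp

lemma pvGo_full (fI ds : List Char) (h : ∀ x ∈ ds, x ∈ fI) :
    (pvGo fI ds).flatten = pvKeepLast ds := by
  induction ds with
  | nil => rfl
  | cons c t ih =>
    simp only [pvGo, pvKeepLast, List.flatten_cons]
    by_cases hct : c ∈ t
    · rw [if_pos ⟨hct, h c List.mem_cons_self⟩, if_pos hct]
      simpa using ih (fun x hx => h x (List.mem_cons_of_mem c hx))
    · rw [if_neg (fun hh => hct hh.1), if_neg hct]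
      simpa using ih (fun x hx => h x (List.mem_cons_of_mem c hx))

-- A computes: keep each lowercase letter at its last occurrence
lemma pvA_eq (key : String) :
    chiave1 key = String.ofList (pvKeepLast (key.toList.filter pvLCb)) := by
  show String.ofList (PySem.Chars.join [] (pvLoop (pvStrip
      ((key.toList.map (fun c => [c])).map (fun x =>
        if PySem.Chars.strLt x ['a'] || PySem.Chars.strLt ['z'] x then [] else x))) 0))
    = String.ofList (pvKeepLast (key.toList.filter pvLCb))
  rw [List.map_map]
  have hcomp : ((fun x => if PySem.Chars.strLt x ['a'] || PySem.Chars.strLt ['z'] x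
      then ([] : List Char) else x) ∘ (fun c => [c]))
      = (fun c => if PySem.Chars.strLt [c] ['a'] || PySem.Chars.strLt ['z'] [c]
      then ([] : List Char) else [c]) := rfl
  rw [hcomp, pvStrip_eq, pvFilterMap]
  have h0 : (key.toList.filter pvLCb).map (fun c => [c])
      = pvGo ((key.toList.filter pvLCb).take 0) (key.toList.filter pvLCb) := by
    rw [List.take_zero, pvGo_nilF]
  rw [h0, pvLoop_go (key.toList.filter pvLCb) (key.toList.filter pvLCb).length 0 (by omega)]
  rw [pvJoin_flatten, pvGo_full _ _ (fun x hx => hx)]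

-- B side
lemma pvB_fold (t : List Char) : ∀ (out : List Char) (s : PySem.Set Char),
    (t.reverse.foldl
      (fun (acc : List Char × PySem.Set Char) c =>
        if ('a' ≤ c ∧ c ≤ 'z') ∧ ¬(PySem.Set.contains acc.2 c = true)
        then (acc.1 ++ [c], PySem.Set.add acc.2 c) else acc)
      (out, s)).1 = out ++ (pvBSpec s t).reverse
    ∧ ∀ d, d ∈ (t.reverse.foldl
      (fun (acc : List Char × PySem.Set Char) c =>
        if ('a' ≤ c ∧ c ≤ 'z') ∧ ¬(PySem.Set.contains acc.2 c = true)
        then (acc.1 ++ [c], PySem.Set.add acc.2 c) else acc)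
      (out, s)).2 ↔ d ∈ s ∨ (('a' ≤ d ∧ d ≤ 'z') ∧ d ∈ t) := by
  induction t with
  | nil =>
    intro out s
    refine ⟨by simp [pvBSpec], ?_⟩
    intro d; simp
  | cons c t ih =>
    intro out s
    rw [List.reverse_cons, List.foldl_append]
    simp only [List.foldl_cons, List.foldl_nil]
    obtain ⟨ih1, ih2⟩ := ih out s
    by_cases hlc : 'a' ≤ c ∧ c ≤ 'z'
    · by_cases hmem : c ∈ (t.reverse.foldl
        (fun (acc : List Char × PySem.Set Char) c =>
          if ('a' ≤ c ∧ c ≤ 'z') ∧ ¬(PySem.Set.contains acc.2 c = true)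
          then (acc.1 ++ [c], PySem.Set.add acc.2 c) else acc)
        (out, s)).2
      · rw [if_neg (by rw [PySem.Set.contains_iff]; intro hh; exact hh.2 hmem)]
        have hcond : ¬(('a' ≤ c ∧ c ≤ 'z') ∧ c ∉ t ∧ c ∉ s) := by
          have := (ih2 c).1 hmem
          tauto
        constructor
        · rw [ih1, pvBSpec, if_neg hcond]
        · intro d
          rw [ih2 d, List.mem_cons]
          constructor
          · tauto
          · rintro (hd | ⟨hld, hd | hd⟩)
            · exact Or.inl hd
            · subst hd; exact (ih2 d).1 hmem
            · exact Or.inr ⟨hld, hd⟩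
      · rw [if_pos ⟨hlc, by rw [PySem.Set.contains_iff]; exact hmem⟩]
        have hns : c ∉ s := fun hh => hmem ((ih2 c).2 (Or.inl hh))
        have hnt : c ∉ t := fun hh => hmem ((ih2 c).2 (Or.inr ⟨hlc, hh⟩))
        constructor
        · show (t.reverse.foldl _ (out, s)).1 ++ [c] = _
          rw [ih1, pvBSpec, if_pos ⟨hlc, hnt, hns⟩, List.reverse_cons, List.append_assoc]
        · intro d
          show d ∈ PySem.Set.add _ c ↔ _
          rw [PySem.Set.mem_add, ih2 d, List.mem_cons]
          constructor
          · rintro (⟨hd | hd⟩ | hd)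
            · exact Or.inl hd
            · exact Or.inr ⟨hd.1, Or.inr hd.2⟩
            · subst hd; exact Or.inr ⟨hlc, Or.inl rfl⟩
          · rintro (hd | ⟨hld, hd | hd⟩)
            · exact Or.inl (Or.inl hd)
            · exact Or.inr hd
            · exact Or.inl (Or.inr ⟨hld, hd⟩)
    · rw [if_neg (fun hh => hlc hh.1)]
      constructor
      · rw [ih1, pvBSpec, if_neg (fun hh => hlc hh.1)]
      · intro d
        rw [ih2 d, List.mem_cons]
        constructor
        · tauto
        · rintro (hd | ⟨hld, hd | hd⟩)
          · exact Or.inl hd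
          · subst hd; exact absurd hld hlc
          · exact Or.inr ⟨hld, hd⟩

lemma pvBSpec_keepLast (cs : List Char) :
    pvBSpec [] cs = pvKeepLast (cs.filter pvLCb) := by
  induction cs with
  | nil => rfl
  | cons c t ih =>
    simp only [pvBSpec, List.filter_cons]
    by_cases hlc : 'a' ≤ c ∧ c ≤ 'z'
    · have hb : pvLCb c = true := by simp [pvLCb, hlc]
      rw [if_pos hb]
      have hmem : c ∈ t ↔ c ∈ t.filter pvLCb := by
        constructor
        · intro hh; exact List.mem_filter.2 ⟨hh, hb⟩
        · intro hh; exact (List.mem_filter.1 hh).1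
      by_cases hct : c ∈ t
      · rw [if_neg (by simp [hct]), pvKeepLast, if_pos (hmem.1 hct), ih]
      · rw [if_pos ⟨hlc, hct, by simp⟩, pvKeepLast, if_neg (fun hh => hct (hmem.2 hh)), ih]
    · have hb : pvLCb c = false := by
        simp only [pvLCb]
        exact decide_eq_false hlc
      rw [if_neg (fun hh => hlc hh.1), if_neg (by simp [hb]), ih]

lemma pvB_eq (key : String) :
    chiave1_alt key = String.ofList (pvKeepLast (key.toList.filter pvLCb)) := by
  unfold chiave1_alt
  simp only []
  rw [(pvB_fold key.toList [] PySem.Set.empty).1]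
  simp [pvBSpec_keepLast]

-- ===== VERDICT (by name: the statement is the Claim_ definition above) =====
theorem chiave1_spec : Claim_equal_chiave1 := by
  intro key _
  unfold Spec_chiave1
  rw [pvA_eq, pvB_eq]
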